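-- pv_equiv track=rewrite | github.com/fcannizzohz/hazelcast-cp-agent | analysis-agent/analysis.py | _fmt_labels
-- ===== SOURCE A (Python) =====
-- def _fmt_labels(labels: dict) -> str:
--     if not labels:
--         return "(aggregate)"
--     priority = ["name", "group", "mc_member", "role"]
--     parts = []
--     for k in priority:
--         if k in labels:
--             parts.append(f"{k}={labels[k]}")
--     for k, v in labels.items():
--         if k not in priority:
--             parts.append(f"{k}={v}")
--     return ", ".join(parts) if parts else "(no labels)"
-- ===== SOURCE B (Python) =====
-- def _fmt_labels(labels: dict) -> str:
--     if not labels: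
--         return "(aggregate)"
--     priority = ["name", "group", "mc_member", "role"]
--     rank = {k: i for i, k in enumerate(priority)}
--     ordered = sorted(labels.items(), key=lambda kv: rank.get(kv[0], len(priority)))
--     parts = [f"{k}={v}" for k, v in ordered]
--     return ", ".join(parts) if parts else "(no labels)"
-- ===== Notes on version B (the rewrite author's own statement) =====
-- stated objective: simpler
-- what changed: Replaces A's two selection passes (one scan over the priority list with membership lookups, one scan over the dict items filtering out priority keys) by a single stable sort of the items under a precomputed rank dict, then one formatting pass.
import Mathlib
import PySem

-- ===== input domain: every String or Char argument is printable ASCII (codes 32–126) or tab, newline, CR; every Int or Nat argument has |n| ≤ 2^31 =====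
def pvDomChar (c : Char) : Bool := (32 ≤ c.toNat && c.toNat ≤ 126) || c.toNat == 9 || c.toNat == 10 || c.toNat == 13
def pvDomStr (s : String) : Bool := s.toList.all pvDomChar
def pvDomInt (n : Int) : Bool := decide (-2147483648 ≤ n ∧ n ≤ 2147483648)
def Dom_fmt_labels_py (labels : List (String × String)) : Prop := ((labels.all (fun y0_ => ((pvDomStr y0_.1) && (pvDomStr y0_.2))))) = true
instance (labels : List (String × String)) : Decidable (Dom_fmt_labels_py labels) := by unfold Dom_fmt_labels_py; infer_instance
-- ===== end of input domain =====

-- B replaces A's two selection passes by one stable sort of the items under a precomputed rank dict: simpler, one formatting pass.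


-- ===== PORT A =====
def fmt_labels_py (labels : List (String × String)) : String :=
  if labels = [] then "(aggregate)"
  else
    let d : PySem.Dict String String := ⟨labels⟩
    let priority : List String := ["name", "group", "mc_member", "role"]
    let parts1 : List String := priority.foldl (fun acc k =>
      match PySem.Dict.get? d k with
      | some v => acc ++ [k ++ "=" ++ v]
      | none => acc) []
    let parts : List String := labels.foldl (fun acc kv =>
      if kv.1 ∉ priority then acc ++ [kv.1 ++ "=" ++ kv.2] else acc) parts1
    if parts = [] then "(no labels)" else PySem.Str.join ", " parts

-- ===== PORT B =====
def fmt_labels_py_alt (labels : List (String × String)) : String :=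
  if labels = [] then "(aggregate)"
  else
    let priority : List String := ["name", "group", "mc_member", "role"]
    let rank : PySem.Dict String Int := (PySem.List.enumerate priority).foldl
      (fun d p => PySem.Dict.insert d p.2 p.1) ⟨[]⟩
    let ordered : List (String × String) := PySem.List.sorted labels
      (fun kv => PySem.Dict.getD rank kv.1 (priority.length : Int)) false
    let parts : List String := ordered.map (fun kv => kv.1 ++ "=" ++ kv.2)
    if parts = [] then "(no labels)" else PySem.Str.join ", " parts

-- ===== PRECONDITION & SPEC =====
-- Pre_ excludes association lists with duplicate keys: they cannot arise from a Python dict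
-- (dict construction collapses duplicates), so A's behaviour there is unspecified.
def Pre_fmt_labels_py (labels : List (String × String)) : Prop := (labels.map Prod.fst).Nodup
instance (labels : List (String × String)) : Decidable (Pre_fmt_labels_py labels) := by unfold Pre_fmt_labels_py; infer_instance
def pvWitness_fmt_labels_py : (List (String × String)) := [("name", "n1"), ("x", "2")]

def Spec_fmt_labels_py (labels : List (String × String)) (out : String) : Prop := out = fmt_labels_py_alt labels
instance (labels : List (String × String)) (out : String) : Decidable (Spec_fmt_labels_py labels out) := by unfold Spec_fmt_labels_py; infer_instance

-- ===== CLAIM (what is proved, stated in full; the proofs are below) =====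
def Claim_equal_fmt_labels_py : Prop := ∀ (labels : List (String × String)), Dom_fmt_labels_py labels → Pre_fmt_labels_py labels → Spec_fmt_labels_py labels (fmt_labels_py labels)

-- ===== LEMMAS AND PROOFS =====

-- the rank the sort key assigns to a key string (proof-only characterisation)
def rankOf (k : String) : Int :=
  if k = "name" then 0 else if k = "group" then 1 else if k = "mc_member" then 2
  else if k = "role" then 3 else 4

lemma insertBy_cons {α : Type} (bef : α → α → Bool) (x y : α) (ys : List α) :
    PySem.List.insertBy bef x (y :: ys) =
      if bef x y then x :: y :: ys else y :: PySem.List.insertBy bef x ys := by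
  simp [PySem.List.insertBy]

lemma insertBy_append_of_not_before {α : Type} (bef : α → α → Bool) (x : α)
    (as bs : List α) (h : ∀ a ∈ as, bef x a = false) :
    PySem.List.insertBy bef x (as ++ bs) = as ++ PySem.List.insertBy bef x bs := by
  induction as with
  | nil => simp
  | cons a as ih =>
      have ha : bef x a = false := h a (by simp)
      simp [insertBy_cons, ha, ih (fun a' ha' => h a' (by simp [ha']))]

lemma insertBy_flatMap {α : Type} (f : α → Int) (x : α) :
    ∀ (ks : List Int) (g : Int → List α), ks.Pairwise (· < ·) →
      (∀ r ∈ ks, ∀ y ∈ g r, f y = r) → f x ∈ ks →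
      PySem.List.insertBy (fun a b => decide (f a < f b)) x (ks.flatMap g) =
        ks.flatMap (fun r => g r ++ if f x = r then [x] else []) := by
  intro ks
  induction ks with
  | nil => intro g _ _ hx; simp at hx
  | cons r ks ih =>
      intro g hp hg hx
      have hlt : ∀ r' ∈ ks, r < r' := (List.pairwise_cons.mp hp).1
      by_cases hxr : f x = r
      · have hblock : ∀ a ∈ g r, (decide (f x < f a) : Bool) = false := by
          intro a ha
          simp [hg r (by simp) a ha, hxr]
        rw [List.flatMap_cons, insertBy_append_of_not_before _ _ _ _ hblock]
        have hrest : PySem.List.insertBy (fun a b => decide (f a < f b)) x (ks.flatMap g) =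
            x :: ks.flatMap g := by
          cases hks : ks.flatMap g with
          | nil => simp [PySem.List.insertBy]
          | cons y ys =>
              have hy : y ∈ ks.flatMap g := by simp [hks]
              obtain ⟨r', hr', hyg⟩ := List.mem_flatMap.mp hy
              have : f x < f y := by
                rw [hxr, hg r' (by simp [hr']) y hyg]; exact hlt r' hr'
              simp [insertBy_cons, this]
        rw [hrest]
        have hrw : ks.flatMap (fun r' => g r' ++ if r = r' then [x] else []) = ks.flatMap g := by
          apply List.flatMap_congr
          intro r' hr'
          have : r ≠ r' := by have := hlt r' hr'; omega
          simp [this]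
        simp [List.flatMap_cons, hxr, hrw]
      · have hx' : f x ∈ ks := by
          rcases List.mem_cons.mp hx with h | h
          · exact absurd h hxr
          · exact h
        have hblock : ∀ a ∈ g r, (decide (f x < f a) : Bool) = false := by
          intro a ha
          have hfa : f a = r := hg r (by simp) a ha
          have : r < f x := hlt _ hx'
          simp [hfa]; omega
        rw [List.flatMap_cons, insertBy_append_of_not_before _ _ _ _ hblock,
          ih g ((List.pairwise_cons.mp hp).2) (fun r' hr' => hg r' (by simp [hr'])) hx']
        simp [List.flatMap_cons, hxr]

lemma sorted_bucket {α : Type} (f : α → Int) (ks : List Int) (hks : ks.Pairwise (· < ·)) :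
    ∀ (xs : List α), (∀ x ∈ xs, f x ∈ ks) →
      PySem.List.sorted xs f false = ks.flatMap (fun r => xs.filter (fun x => decide (f x = r))) := by
  intro xs
  induction xs using List.reverseRecOn with
  | nil => intro _; simp [PySem.List.sorted]
  | append_singleton xs x ih =>
      intro hall
      rw [PySem.List.sorted_eq_foldl_insertBy, List.foldl_append, ← PySem.List.sorted_eq_foldl_insertBy]
      rw [ih (fun y hy => hall y (by simp [hy]))]
      simp only [List.foldl_cons, List.foldl_nil]
      rw [insertBy_flatMap f x ks (fun r => xs.filter (fun y => decide (f y = r))) hks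
        (fun r _ y hy => by simpa using (List.mem_filter.mp hy).2) (hall x (by simp))]
      apply List.flatMap_congr
      intro r hr
      by_cases h : f x = r <;> simp [List.filter_append, h]

-- the literal rank dict B builds
lemma rank_dict_eq :
    (PySem.List.enumerate ["name", "group", "mc_member", "role"]).foldl
      (fun d p => PySem.Dict.insert d p.2 p.1) (⟨[]⟩ : PySem.Dict String Int) =
    ⟨[("name", 0), ("group", 1), ("mc_member", 2), ("role", 3)]⟩ := by
  decide

lemma getD_rank (k : String) :
    PySem.Dict.getD (⟨[("name", 0), ("group", 1), ("mc_member", 2), ("role", 3)]⟩ : PySem.Dict String Int) k 4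
      = rankOf k := by
  by_cases h1 : k = "name"
  · subst h1; decide
  by_cases h2 : k = "group"
  · subst h2; decide
  by_cases h3 : k = "mc_member"
  · subst h3; decide
  by_cases h4 : k = "role"
  · subst h4; decide
  have e1 : ("name" == k) = false := beq_eq_false_iff_ne.mpr (Ne.symm h1)
  have e2 : ("group" == k) = false := beq_eq_false_iff_ne.mpr (Ne.symm h2)
  have e3 : ("mc_member" == k) = false := beq_eq_false_iff_ne.mpr (Ne.symm h3)
  have e4 : ("role" == k) = false := beq_eq_false_iff_ne.mpr (Ne.symm h4)
  simp [rankOf, PySem.Dict.getD, PySem.Dict.get?, List.find?, e1, e2, e3, e4, h1, h2, h3, h4]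

lemma rankOf_mem (k : String) : rankOf k ∈ ([0, 1, 2, 3, 4] : List Int) := by
  unfold rankOf; split_ifs <;> simp

lemma rankOf_eq_zero (k : String) : (rankOf k = 0) ↔ k = "name" := by
  unfold rankOf; split_ifs <;> simp_all
lemma rankOf_eq_one (k : String) : (rankOf k = 1) ↔ k = "group" := by
  unfold rankOf; split_ifs <;> simp_all
lemma rankOf_eq_two (k : String) : (rankOf k = 2) ↔ k = "mc_member" := by
  unfold rankOf; split_ifs <;> simp_all
lemma rankOf_eq_three (k : String) : (rankOf k = 3) ↔ k = "role" := by
  unfold rankOf; split_ifs <;> simp_all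
lemma rankOf_eq_four (k : String) : (rankOf k = 4) ↔ k ∉ (["name", "group", "mc_member", "role"] : List String) := by
  unfold rankOf; split_ifs <;> simp_all

-- under Nodup keys, the bucket of one key is what A's dict lookup yields
lemma filter_key_eq (labels : List (String × String)) (hnd : (labels.map Prod.fst).Nodup) (k : String) :
    labels.filter (fun kv => decide (kv.1 = k)) =
      (match PySem.Dict.get? (⟨labels⟩ : PySem.Dict String String) k with
       | some v => [(k, v)]
       | none => []) := by
  induction labels with
  | nil => simp [PySem.Dict.get?, List.find?]
  | cons p t ih =>
      have hnd' : (t.map Prod.fst).Nodup := (List.nodup_cons.mp hnd).2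
      have hp : p.1 ∉ t.map Prod.fst := (List.nodup_cons.mp hnd).1
      by_cases h : p.1 = k
      · have hbeq : (p.1 == k) = true := beq_iff_eq.mpr h
        have hnone : List.find? (fun q => q.1 == k) t = none := by
          rw [List.find?_eq_none]
          intro q hq
          have : q.1 ≠ k := by
            intro hqk
            exact hp (h ▸ hqk ▸ List.mem_map.mpr ⟨q, hq, rfl⟩)
          simpa using this
        have ht : t.filter (fun kv => decide (kv.1 = k)) = [] := by
          rw [ih hnd']; simp [PySem.Dict.get?, hnone]
        simp [PySem.Dict.get?, List.find?, h, ht]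
        exact h ▸ rfl
      · have hbeq : (p.1 == k) = false := beq_eq_false_iff_ne.mpr h
        have hfilter : (p :: t).filter (fun kv => decide (kv.1 = k)) = t.filter (fun kv => decide (kv.1 = k)) := by
          simp [h]
        rw [hfilter, ih hnd']
        simp [PySem.Dict.get?, List.find?, hbeq]

lemma foldl_priority (labels : List (String × String)) :
    ∀ (ps : List String) (init : List String),
      ps.foldl (fun acc k =>
        match PySem.Dict.get? (⟨labels⟩ : PySem.Dict String String) k with
        | some v => acc ++ [k ++ "=" ++ v]
        | none => acc) init =
      init ++ ps.flatMap (fun k =>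
        match PySem.Dict.get? (⟨labels⟩ : PySem.Dict String String) k with
        | some v => [k ++ "=" ++ v]
        | none => []) := by
  intro ps
  induction ps with
  | nil => simp
  | cons k ps ih =>
      intro init
      cases h : PySem.Dict.get? (⟨labels⟩ : PySem.Dict String String) k <;>
        simp [List.foldl_cons, List.flatMap_cons, h, ih]

-- map the formatter over one bucket
lemma map_fmt_bucket (labels : List (String × String)) (hnd : (labels.map Prod.fst).Nodup) (k : String) :
    (labels.filter (fun kv => decide (kv.1 = k))).map (fun kv => kv.1 ++ "=" ++ kv.2) =
      (match PySem.Dict.get? (⟨labels⟩ : PySem.Dict String String) k with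
       | some v => [k ++ "=" ++ v]
       | none => []) := by
  rw [filter_key_eq labels hnd k]
  cases PySem.Dict.get? (⟨labels⟩ : PySem.Dict String String) k <;> simp

-- ===== VERDICT (by name: the statement is the Claim_ definition above) =====
theorem fmt_labels_py_spec : Claim_equal_fmt_labels_py := by
  intro labels _ hnd
  unfold Spec_fmt_labels_py fmt_labels_py fmt_labels_py_alt
  by_cases hnil : labels = []
  · simp [hnil]
  · simp only [hnil, if_false]
    rw [rank_dict_eq]
    have hkey : (fun kv : String × String =>
        PySem.Dict.getD (⟨[("name", 0), ("group", 1), ("mc_member", 2), ("role", 3)]⟩ : PySem.Dict String Int)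
          kv.1 ((["name", "group", "mc_member", "role"] : List String).length : Int)) =
        (fun kv : String × String => rankOf kv.1) := by
      funext kv; simpa using getD_rank kv.1
    rw [hkey]
    rw [sorted_bucket (fun kv : String × String => rankOf kv.1) [0, 1, 2, 3, 4] (by decide)
      labels (fun x _ => rankOf_mem x.1)]
    -- rewrite the five buckets
    have hb0 := map_fmt_bucket labels hnd "name"
    have hb1 := map_fmt_bucket labels hnd "group"
    have hb2 := map_fmt_bucket labels hnd "mc_member"
    have hb3 := map_fmt_bucket labels hnd "role"
    have e0 : labels.filter (fun kv => decide (rankOf kv.1 = 0)) = labels.filter (fun kv => decide (kv.1 = "name")) :=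
      List.filter_congr (fun kv _ => by simp [rankOf_eq_zero])
    have e1 : labels.filter (fun kv => decide (rankOf kv.1 = 1)) = labels.filter (fun kv => decide (kv.1 = "group")) :=
      List.filter_congr (fun kv _ => by simp [rankOf_eq_one])
    have e2 : labels.filter (fun kv => decide (rankOf kv.1 = 2)) = labels.filter (fun kv => decide (kv.1 = "mc_member")) :=
      List.filter_congr (fun kv _ => by simp [rankOf_eq_two])
    have e3 : labels.filter (fun kv => decide (rankOf kv.1 = 3)) = labels.filter (fun kv => decide (kv.1 = "role")) :=
      List.filter_congr (fun kv _ => by simp [rankOf_eq_three])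
    have e4 : labels.filter (fun kv => decide (rankOf kv.1 = 4)) =
        labels.filter (fun kv => decide (kv.1 ∉ (["name", "group", "mc_member", "role"] : List String))) :=
      List.filter_congr (fun kv _ => by simp [rankOf_eq_four])
    rw [foldl_priority labels]
    have hA : ∀ init : List String,
        List.foldl (fun acc kv =>
            if kv.1 ∉ (["name", "group", "mc_member", "role"] : List String)
            then acc ++ [kv.1 ++ "=" ++ kv.2] else acc) init labels
          = init ++ (labels.filter
              (fun kv => decide (kv.1 ∉ (["name", "group", "mc_member", "role"] : List String)))).map
              (fun kv => kv.1 ++ "=" ++ kv.2) := by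
      intro init
      rw [show (fun (acc : List String) (kv : String × String) =>
            if kv.1 ∉ (["name", "group", "mc_member", "role"] : List String)
            then acc ++ [kv.1 ++ "=" ++ kv.2] else acc)
          = (fun (acc : List String) (kv : String × String) =>
            if (decide (kv.1 ∉ (["name", "group", "mc_member", "role"] : List String))) = true
            then acc ++ [kv.1 ++ "=" ++ kv.2] else acc) from by
        funext acc kv; simp]
      exact PySem.List.foldl_append_if _ _ labels init
    rw [hA]
    simp only [List.flatMap_cons, List.flatMap_nil, List.map_append, e0, e1, e2, e3, e4,
      hb0, hb1, hb2, hb3, List.nil_append, List.append_nil, List.append_assoc]
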